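-- pv_equiv track=rewrite | github.com/uzhao/Junment | context_agent/services/file_loader.py | _find_hit_lines
-- ===== SOURCE A (Python) =====
-- def _find_hit_lines(lines: list[str], match_terms: list[str]) -> list[int]:
--     """返回命中行号（1-based）。"""
--
--     if not match_terms:
--         return []
--     lowered_terms = [t.lower() for t in match_terms]
--     hits: list[int] = []
--     for i, line in enumerate(lines):
--         line_lower = line.lower()
--         if any(t in line_lower for t in lowered_terms):
--             hits.append(i + 1)  # 1-based
--     return hits
-- ===== SOURCE B (Python) =====
-- def _find_hit_lines(lines: list[str], match_terms: list[str]) -> list[int]: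
--     """返回命中行号（1-based）。"""
--     if not match_terms:
--         return []
--     lowered = [line.lower() for line in lines]
--     hits: set[int] = set()
--     remaining = list(range(len(lines)))
--     for term in match_terms:
--         t = term.lower()
--         still = []
--         for i in remaining:
--             if t in lowered[i]:
--                 hits.add(i + 1)
--             else:
--                 still.append(i)
--         remaining = still
--     return sorted(hits)
-- ===== Notes on version B (the rewrite author's own statement) =====
-- stated objective: alternative
-- what changed: Inverted the loop nesting: term-outer/line-inner over precomputed lowered lines, keeping a shrinking work list of not-yet-hit line indices (a line is dropped at its first hit), accumulating 1-based hit numbers in a set and returning sorted(hits) instead of appending in line order with a short-circuiting any().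
import Mathlib
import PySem

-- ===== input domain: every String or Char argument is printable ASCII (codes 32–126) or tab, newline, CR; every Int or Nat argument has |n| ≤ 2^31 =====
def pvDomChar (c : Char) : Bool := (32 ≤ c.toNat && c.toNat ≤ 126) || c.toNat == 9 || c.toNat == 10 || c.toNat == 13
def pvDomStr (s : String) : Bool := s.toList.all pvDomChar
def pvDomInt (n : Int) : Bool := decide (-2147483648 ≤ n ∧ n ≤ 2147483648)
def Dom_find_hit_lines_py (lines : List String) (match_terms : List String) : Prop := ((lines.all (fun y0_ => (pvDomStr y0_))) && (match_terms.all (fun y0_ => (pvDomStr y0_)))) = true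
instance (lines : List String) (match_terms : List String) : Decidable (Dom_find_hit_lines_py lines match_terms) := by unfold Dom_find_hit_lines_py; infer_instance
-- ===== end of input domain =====

-- B inverts the loop nesting (term-outer/line-inner over precomputed lowered lines),
-- accumulating 1-based hit line numbers in a set and returning sorted(hits); alternative, same cost.

-- ===== PORT A =====
def find_hit_lines_py (lines : List String) (match_terms : List String) : List Int :=
  if match_terms = [] then []
  else
    let lowered_terms := match_terms.map PySem.Str.lower
    (PySem.List.enumerate lines).foldl (fun hits p =>
      let line_lower := PySem.Str.lower p.2
      if lowered_terms.any (fun t => PySem.Str.isIn t line_lower) then hits ++ [p.1 + 1] else hits) []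

-- ===== PORT B =====
def find_hit_lines_py_alt (lines : List String) (match_terms : List String) : List Int :=
  if match_terms = [] then []
  else
    let lowered := lines.map PySem.Str.lower
    let res := match_terms.foldl (fun (st : PySem.Set Int × List Int) term =>
        let t := PySem.Str.lower term
        st.2.foldl (fun (st' : PySem.Set Int × List Int) i =>
          if PySem.Str.isIn t (PySem.List.pyGetD lowered i "") then (PySem.Set.add st'.1 (i + 1), st'.2)
          else (st'.1, st'.2 ++ [i])) (st.1, ([] : List Int)))
      (PySem.Set.empty, PySem.List.pyRange 0 (lines.length : Int) 1)
    PySem.List.sorted res.1 (fun x => x) false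

-- ===== PRECONDITION & SPEC =====
def Spec_find_hit_lines_py (lines : List String) (match_terms : List String) (out : List Int) : Prop := out = find_hit_lines_py_alt lines match_terms
instance (lines : List String) (match_terms : List String) (out : List Int) : Decidable (Spec_find_hit_lines_py lines match_terms out) := by unfold Spec_find_hit_lines_py; infer_instance

-- ===== CLAIM (what is proved, stated in full; the proofs are below) =====
def Claim_equal_find_hit_lines_py : Prop := ∀ (lines : List String) (match_terms : List String), Dom_find_hit_lines_py lines match_terms → Spec_find_hit_lines_py lines match_terms (find_hit_lines_py lines match_terms)

-- ===== LEMMAS AND PROOFS =====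

-- A's fold is the filtered-and-mapped enumeration.
theorem findA_eq_filter_map (lines : List String) (match_terms : List String) (h : match_terms ≠ []) :
    find_hit_lines_py lines match_terms =
      ((PySem.List.enumerate lines).filter
        (fun p => (match_terms.map PySem.Str.lower).any (fun t => PySem.Str.isIn t (PySem.Str.lower p.2)))).map
        (fun p => p.1 + 1) := by
  unfold find_hit_lines_py
  rw [if_neg h]
  show List.foldl (fun hits p =>
      if (match_terms.map PySem.Str.lower).any (fun t => PySem.Str.isIn t (PySem.Str.lower p.2)) then hits ++ [p.1 + 1] else hits)
      [] (PySem.List.enumerate lines) = _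
  rw [PySem.List.foldl_append_if, List.nil_append]

-- The inner pass of B: adds the hits among the remaining indices to the set, keeps the misses in order.
theorem inner_fold_eq (c : Int → Bool) (ps : List Int) (s : List Int) (acc : List Int) :
    ps.foldl (fun (st : PySem.Set Int × List Int) i =>
        if c i then (PySem.Set.add st.1 (i + 1), st.2) else (st.1, st.2 ++ [i])) (s, acc)
      = (ps.foldl (fun s i => if c i then PySem.Set.add s (i + 1) else s) s,
         acc ++ ps.filter (fun i => !(c i))) := by
  induction ps generalizing s acc with
  | nil => simp
  | cons q qs ih =>
    simp only [List.foldl_cons, List.filter_cons]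
    by_cases hq : c q = true
    · rw [if_pos hq, if_pos hq, ih, hq]
      simp
    · have hq' : c q = false := eq_false_of_ne_true hq
      rw [if_neg hq, if_neg hq, ih, hq']
      simp

-- Membership/Nodup for the hit-set accumulation.
theorem mem_inner_fold (c : Int → Bool) (ps : List Int) (s : List Int) (x : Int) :
    x ∈ ps.foldl (fun s i => if c i then PySem.Set.add s (i + 1) else s) s ↔
      x ∈ s ∨ ∃ i ∈ ps, c i = true ∧ x = i + 1 := by
  induction ps generalizing s with
  | nil => simp
  | cons q qs ih =>
    simp only [List.foldl_cons]
    by_cases hq : c q = true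
    · rw [if_pos hq, ih]
      simp [PySem.Set.mem_add]
      tauto
    · rw [if_neg hq, ih]
      simp only [List.mem_cons]
      constructor
      · rintro (h1 | ⟨i, hi, hc, hx⟩)
        · exact Or.inl h1
        · exact Or.inr ⟨i, Or.inr hi, hc, hx⟩
      · rintro (h1 | ⟨i, (rfl | hi), hc, hx⟩)
        · exact Or.inl h1
        · exact absurd hc hq
        · exact Or.inr ⟨i, hi, hc, hx⟩

theorem nodup_inner_fold (c : Int → Bool) (ps : List Int) (s : List Int) (hs : s.Nodup) :
    (ps.foldl (fun s i => if c i then PySem.Set.add s (i + 1) else s) s).Nodup := by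
  induction ps generalizing s with
  | nil => exact hs
  | cons q qs ih =>
    simp only [List.foldl_cons]
    split
    · exact ih _ (PySem.Set.nodup_add _ _ hs)
    · exact ih _ hs

-- Membership/Nodup for the outer fold of B: dropping already-hit indices loses no hit.
theorem mem_outer_fold (g : String → Int → Bool) (terms : List String) (ps : List Int) (s : List Int) (x : Int) :
    x ∈ (terms.foldl (fun (st : PySem.Set Int × List Int) term =>
        st.2.foldl (fun (st' : PySem.Set Int × List Int) i =>
          if g term i then (PySem.Set.add st'.1 (i + 1), st'.2)
          else (st'.1, st'.2 ++ [i])) (st.1, ([] : List Int))) (s, ps)).1 ↔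
      x ∈ s ∨ ∃ term ∈ terms, ∃ i ∈ ps, g term i = true ∧ x = i + 1 := by
  induction terms generalizing s ps with
  | nil => simp
  | cons u us ih =>
    simp only [List.foldl_cons]
    rw [inner_fold_eq, ih, mem_inner_fold]
    simp only [List.mem_cons, List.nil_append, List.mem_filter, Bool.not_eq_eq_eq_not, Bool.not_true]
    constructor
    · rintro ((h1 | ⟨i, hi, hc, hx⟩) | ⟨term, ht, i, ⟨hi, _⟩, hc, hx⟩)
      · exact Or.inl h1
      · exact Or.inr ⟨u, Or.inl rfl, i, hi, hc, hx⟩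
      · exact Or.inr ⟨term, Or.inr ht, i, hi, hc, hx⟩
    · rintro (h1 | ⟨term, (rfl | ht), i, hi, hc, hx⟩)
      · exact Or.inl (Or.inl h1)
      · exact Or.inl (Or.inr ⟨i, hi, hc, hx⟩)
      · by_cases hu : g u i = true
        · exact Or.inl (Or.inr ⟨i, hi, hu, hx⟩)
        · exact Or.inr ⟨term, ht, i, ⟨hi, by simpa using hu⟩, hc, hx⟩

theorem nodup_outer_fold (g : String → Int → Bool) (terms : List String) (ps : List Int) (s : List Int) (hs : s.Nodup) :
    ((terms.foldl (fun (st : PySem.Set Int × List Int) term =>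
        st.2.foldl (fun (st' : PySem.Set Int × List Int) i =>
          if g term i then (PySem.Set.add st'.1 (i + 1), st'.2)
          else (st'.1, st'.2 ++ [i])) (st.1, ([] : List Int))) (s, ps)).1).Nodup := by
  induction terms generalizing s ps with
  | nil => exact hs
  | cons u us ih =>
    simp only [List.foldl_cons]
    rw [inner_fold_eq]
    exact ih _ _ (nodup_inner_fold _ _ _ hs)

-- Membership in A's result.
theorem mem_findA (lines : List String) (match_terms : List String) (h : match_terms ≠ []) (x : Int) :
    x ∈ find_hit_lines_py lines match_terms ↔
      ∃ (k : Nat), ∃ (_ : k < lines.length),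
        (∃ term ∈ match_terms, PySem.Str.isIn (PySem.Str.lower term) (PySem.Str.lower lines[k]) = true) ∧ x = (k : Int) + 1 := by
  rw [findA_eq_filter_map lines match_terms h]
  simp only [List.mem_map, List.mem_filter, PySem.List.mem_enumerate_iff]
  constructor
  · rintro ⟨p, ⟨⟨k, hk, rfl⟩, hc⟩, rfl⟩
    simp only [List.any_eq_true, List.mem_map] at hc
    obtain ⟨t, ⟨term, ht, rfl⟩, hin⟩ := hc
    exact ⟨k, hk, ⟨term, ht, hin⟩, by simp⟩
  · rintro ⟨k, hk, ⟨term, ht, hin⟩, rfl⟩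
    refine ⟨((0:Int) + k, lines[k]), ⟨⟨k, hk, rfl⟩, ?_⟩, by simp⟩
    simp only [List.any_eq_true, List.mem_map]
    exact ⟨PySem.Str.lower term, ⟨term, ht, rfl⟩, hin⟩

-- A's result is strictly increasing.
theorem pairwise_findA (lines : List String) (match_terms : List String) :
    (find_hit_lines_py lines match_terms).Pairwise (· < ·) := by
  by_cases h : match_terms = []
  · simp [find_hit_lines_py, h]
  · rw [findA_eq_filter_map lines match_terms h]
    apply List.Pairwise.map
    · intro a b hab
      exact hab
    · apply List.Pairwise.filter
      apply (PySem.List.pairwise_lt_enumerate lines 0).imp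
      intro a b hab
      omega

-- ===== VERDICT (by name: the statement is the Claim_ definition above) =====
theorem find_hit_lines_py_spec : Claim_equal_find_hit_lines_py := by
  intro lines match_terms _
  unfold Spec_find_hit_lines_py
  by_cases h : match_terms = []
  · simp [find_hit_lines_py, find_hit_lines_py_alt, h]
  · unfold find_hit_lines_py_alt
    rw [if_neg h]
    symm
    apply PySem.List.sorted_eq_of_perm_of_pairwise_lt
    · rw [List.perm_ext_iff_of_nodup]
      · intro x
        rw [mem_findA lines match_terms h x,
          mem_outer_fold (fun term i => PySem.Str.isIn (PySem.Str.lower term) (PySem.List.pyGetD (lines.map PySem.Str.lower) i ""))]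
        simp only [PySem.List.mem_pyRange_one, List.not_mem_nil, false_or, PySem.Set.empty]
        constructor
        · rintro ⟨k, hk, ⟨term, ht, hin⟩, rfl⟩
          refine ⟨term, ht, (k : Int), ⟨by positivity, by exact_mod_cast hk⟩, ?_, rfl⟩
          rw [PySem.List.pyGetD_natCast]
          simpa [List.getD_eq_getElem?_getD, List.getElem?_eq_getElem (by simpa using hk : k < (lines.map PySem.Str.lower).length)] using hin
        · rintro ⟨term, ht, i, ⟨hi0, hin_lt⟩, hin, rfl⟩
          obtain ⟨k, rfl⟩ : ∃ k : Nat, i = (k : Int) := ⟨i.toNat, (Int.toNat_of_nonneg hi0).symm⟩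
          have hk : k < lines.length := by exact_mod_cast hin_lt
          refine ⟨k, hk, ⟨term, ht, ?_⟩, rfl⟩
          rw [PySem.List.pyGetD_natCast] at hin
          simpa [List.getD_eq_getElem?_getD, List.getElem?_eq_getElem (by simpa using hk : k < (lines.map PySem.Str.lower).length)] using hin
      · exact (pairwise_findA lines match_terms).nodup
      · exact nodup_outer_fold _ _ _ _ (by simp [PySem.Set.empty])
    · exact pairwise_findA lines match_terms
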